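-- pv_equiv track=rewrite | github.com/Allan0092/ProgrammingForDevelopers | Question1/Question1B.py | min_time_to_build_engine
-- ===== SOURCE A (Python) =====
-- def min_time_to_build_engine(engines: list[int], split: int):
--     """returns the minimum time for the engineers to work on the engines.
--
--     Args:
--         engines (list[int]): the list of engines
--         split (int): split cost
--
--     Returns:
--         int: the minimum type requires
--     """
--     n = len(engines) # Get the total number of engines
--     dp = [[0] * (n + 1) for _ in range(n + 1)] # initialize dp with the number of engines
--     for i in range(1, n + 1): # iterate through each engine
--         for j in range(1, n + 1): # iterate though engineers
--             if j == 1: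
--                 dp[i][j] = dp[i - 1][j] + engines[i - 1]
--             else:
--                 dp[i][j] = min(dp[i - 1][j - 1] + engines[i - 1], dp[i - 1][j] + split)
--     return dp[n][n]
-- ===== SOURCE B (Python) =====
-- def min_time_to_build_engine(engines: list[int], split: int):
--     """Single left-to-right pass, O(n) time, O(1) space.
--
--     A's dp[i][i] (take the i-th engine from dp[i-1][i-1], or pay `split`
--     on top of dp[i-1][i]) only ever reads off-diagonal entries dp[i-1][i],
--     which equal the running sum of min(engine, split) over the prefix.
--     So two scalars suffice: `best` = dp[i][i], `msum` = that prefix sum.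
--     """
--     if not engines:
--         return 0
--     best = engines[0]
--     msum = min(engines[0], split)
--     for e in engines[1:]:
--         best = min(best + e, msum + split)
--         msum += min(e, split)
--     return best
-- ===== Notes on version B (the rewrite author's own statement) =====
-- stated objective: faster
-- what changed: Replaces the (n+1)x(n+1) DP table with a single pass keeping two scalars: the diagonal dp[i][i] and the running sum of min(engine, split), which provably equals every off-diagonal entry dp[i-1][i] the diagonal recurrence reads.
import Mathlib
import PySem

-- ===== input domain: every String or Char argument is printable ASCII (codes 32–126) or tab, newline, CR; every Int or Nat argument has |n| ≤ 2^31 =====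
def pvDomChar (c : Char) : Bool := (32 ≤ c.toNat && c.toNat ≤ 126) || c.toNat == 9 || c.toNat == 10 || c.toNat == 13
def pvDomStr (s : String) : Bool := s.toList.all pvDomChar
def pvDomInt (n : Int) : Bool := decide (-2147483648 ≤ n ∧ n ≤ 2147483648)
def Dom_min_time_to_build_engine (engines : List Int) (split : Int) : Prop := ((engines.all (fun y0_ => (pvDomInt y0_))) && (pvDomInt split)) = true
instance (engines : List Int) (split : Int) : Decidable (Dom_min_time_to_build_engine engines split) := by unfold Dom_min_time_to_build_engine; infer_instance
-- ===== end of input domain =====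

-- B replaces A's (n+1)×(n+1) DP table with one left-to-right pass keeping two scalars
-- (the diagonal dp[i][i] and the running sum of min(engine, split)); objective: faster (O(n) vs O(n^2)).

-- ===== PORT A =====
-- inner loop body: 'dp[i][j] = …' for one j (indices are in range on every execution,
-- so pyGetD/pySetD are exact here)
def aInner (engines : List Int) (split : Int) (i : Int) (dp : List (List Int)) (j : Int) : List (List Int) :=
  let v : Int :=
    if j == 1 then
      PySem.List.pyGetD (PySem.List.pyGetD dp (i - 1) []) j 0
        + PySem.List.pyGetD engines (i - 1) 0
    else
      min (PySem.List.pyGetD (PySem.List.pyGetD dp (i - 1) []) (j - 1) 0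
             + PySem.List.pyGetD engines (i - 1) 0)
          (PySem.List.pyGetD (PySem.List.pyGetD dp (i - 1) []) j 0 + split)
  PySem.List.pySetD dp i (PySem.List.pySetD (PySem.List.pyGetD dp i []) j v)

-- outer loop body: 'for j in range(1, n + 1): …'
def aOuter (engines : List Int) (split : Int) (n : Int) (dp : List (List Int)) (i : Int) : List (List Int) :=
  (PySem.List.pyRange 1 (n + 1) 1).foldl (aInner engines split i) dp

def min_time_to_build_engine (engines : List Int) (split : Int) : Int :=
  let n : Int := PySem.List.len engines
  let dp : List (List Int) :=
    (PySem.List.pyRange 0 (n + 1) 1).map (fun _ => PySem.List.pyRepeat [(0 : Int)] (n + 1))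
  let dp := (PySem.List.pyRange 1 (n + 1) 1).foldl (aOuter engines split n) dp
  PySem.List.pyGetD (PySem.List.pyGetD dp n []) n 0

-- ===== PORT B =====
def min_time_to_build_engine_alt (engines : List Int) (split : Int) : Int :=
  match engines with
  | [] => 0
  | e0 :: rest =>
    (rest.foldl
      (fun (st : Int × Int) e => (min (st.1 + e) (st.2 + split), st.2 + min e split))
      (e0, min e0 split)).1

-- ===== PRECONDITION & SPEC =====
def Spec_min_time_to_build_engine (engines : List Int) (split : Int) (out : Int) : Prop := out = min_time_to_build_engine_alt engines split
instance (engines : List Int) (split : Int) (out : Int) : Decidable (Spec_min_time_to_build_engine engines split out) := by unfold Spec_min_time_to_build_engine; infer_instance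

-- ===== CLAIM (what is proved, stated in full; the proofs are below) =====
def Claim_equal_min_time_to_build_engine : Prop := ∀ (engines : List Int) (split : Int), Dom_min_time_to_build_engine engines split → Spec_min_time_to_build_engine engines split (min_time_to_build_engine engines split)

-- ===== LEMMAS AND PROOFS =====

-- Functional description of A's table: dpF es split i j = dp[i][j].
def dpF (es : List Int) (split : Int) : Nat → Nat → Int
  | 0, _ => 0
  | _ + 1, 0 => 0
  | i + 1, 1 => dpF es split i 1 + es.getD i 0
  | i + 1, j + 2 => min (dpF es split i (j + 1) + es.getD i 0) (dpF es split i (j + 2) + split)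

-- Running sum of min(engine, split) over the first m engines.
def msum (es : List Int) (split : Int) : Nat → Int
  | 0 => 0
  | m + 1 => msum es split m + min (es.getD m 0) split

-- every strictly-off-diagonal entry dp[i][j] (j > i) equals msum i
theorem dpF_off (es : List Int) (split : Int) :
    ∀ i j, i < j → dpF es split i j = msum es split i := by
  intro i
  induction i with
  | zero => intro j _; simp [dpF, msum]
  | succ i ih =>
    intro j hj
    obtain ⟨j', rfl⟩ : ∃ j', j = j' + 2 := ⟨j - 2, by omega⟩
    rw [dpF, ih (j' + 1) (by omega), ih (j' + 2) (by omega), min_add_add_left, msum]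

theorem dpF_diag (es : List Int) (split : Int) (i : Nat) :
    dpF es split (i + 2) (i + 2) =
      min (dpF es split (i + 1) (i + 1) + es.getD (i + 1) 0) (msum es split (i + 1) + split) := by
  show dpF es split (i + 1 + 1) (i + 2) = _
  rw [dpF, dpF_off es split (i + 1) (i + 2) (by omega)]

-- ---- B's fold computes (dpF (k+1) (k+1), msum (k+1)) ----
theorem b_fold (e0 : Int) (rest : List Int) (split : Int) :
    ∀ k, k ≤ rest.length →
      (rest.take k).foldl
          (fun (st : Int × Int) e => (min (st.1 + e) (st.2 + split), st.2 + min e split))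
          (e0, min e0 split)
        = (dpF (e0 :: rest) split (k + 1) (k + 1), msum (e0 :: rest) split (k + 1)) := by
  intro k
  induction k with
  | zero => intro _; simp [dpF, msum]
  | succ k ih =>
    intro hk
    have hklt : k < rest.length := by omega
    rw [List.take_add_one, List.getElem?_eq_getElem hklt]
    simp only [Option.toList_some, List.foldl_append, List.foldl_cons, List.foldl_nil,
      ih (by omega)]
    rw [dpF_diag]
    simp [msum, List.getD_eq_getElem?_getD, List.getElem?_eq_getElem hklt]

theorem b_eq_dpF (es : List Int) (split : Int) :
    min_time_to_build_engine_alt es split = dpF es split es.length es.length := by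
  cases es with
  | nil => simp [min_time_to_build_engine_alt, dpF]
  | cons e0 rest =>
    rw [min_time_to_build_engine_alt, ← List.take_length (l := rest),
      b_fold e0 rest split rest.length le_rfl]
    simp

-- ---- A's table states ----
def fullRow (es : List Int) (split : Int) (n i : Nat) : List Int :=
  (List.range (n + 1)).map (fun b => dpF es split i b)

def rowP (es : List Int) (split : Int) (n i j : Nat) : List Int :=
  (List.range (n + 1)).map (fun b => if 1 ≤ b ∧ b ≤ j then dpF es split i b else 0)

def tabl (es : List Int) (split : Int) (n k : Nat) : List (List Int) :=
  (List.range (n + 1)).map (fun a => if a ≤ k then fullRow es split n a else List.replicate (n + 1) 0)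

def midT (es : List Int) (split : Int) (n i j : Nat) : List (List Int) :=
  (List.range (n + 1)).map (fun a =>
    if a < i then fullRow es split n a
    else if a = i then rowP es split n i j
    else List.replicate (n + 1) 0)

theorem set_map_range {β : Type} (f : Nat → β) (m k : Nat) (v : β) (_hk : k < m) :
    ((List.range m).map f).set k v = (List.range m).map (fun b => if b = k then v else f b) := by
  apply List.ext_getElem (by simp)
  intro i h1 h2
  simp only [List.getElem_set, List.getElem_map, List.getElem_range] at *
  by_cases h : k = i <;> simp [h, eq_comm]

theorem inner_step (es : List Int) (split : Int) (n ic jc : Nat)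
    (h1 : 1 ≤ ic) (hi : ic ≤ n) (hj : jc + 1 ≤ n) (hlen : es.length = n) :
    aInner es split (ic : Int) (midT es split n ic jc) ((jc + 1 : Nat) : Int)
      = midT es split n ic (jc + 1) := by
  obtain ⟨i', rfl⟩ : ∃ i', ic = i' + 1 := ⟨ic - 1, by omega⟩
  have hc1 : ((i' + 1 : Nat) : Int) - 1 = ((i' : Nat) : Int) := by push_cast; ring
  have hrowprev :
      PySem.List.pyGetD (midT es split n (i' + 1) jc) ((i' : Nat) : Int) [] = fullRow es split n i' := by
    rw [PySem.List.pyGetD_natCast, midT, PySem.List.getD_map_range _ _ _ _ (by omega)]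
    simp
  have hrowcur :
      PySem.List.pyGetD (midT es split n (i' + 1) jc) ((i' + 1 : Nat) : Int) [] = rowP es split n (i' + 1) jc := by
    rw [PySem.List.pyGetD_natCast, midT, PySem.List.getD_map_range _ _ _ _ (by omega)]
    simp
  have hread : ∀ x : Nat, x ≤ n → PySem.List.pyGetD (fullRow es split n i') ((x : Nat) : Int) 0 = dpF es split i' x := by
    intro x hx
    rw [PySem.List.pyGetD_natCast, fullRow, PySem.List.getD_map_range _ _ _ _ (by omega)]
  have hes : PySem.List.pyGetD es ((i' : Nat) : Int) 0 = es.getD i' 0 := PySem.List.pyGetD_natCast es i' 0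
  have hsetrow : ∀ v, v = dpF es split (i' + 1) (jc + 1) →
      (rowP es split n (i' + 1) jc).set (jc + 1) v = rowP es split n (i' + 1) (jc + 1) := by
    intro v hv
    rw [rowP, set_map_range _ _ _ _ (by omega)]
    apply List.map_congr_left
    intro b hb
    by_cases h : b = jc + 1
    · subst h; rw [if_pos rfl, if_pos (by omega : 1 ≤ jc + 1 ∧ jc + 1 ≤ jc + 1), hv]
    · rw [if_neg h]
      by_cases h2 : 1 ≤ b ∧ b ≤ jc
      · rw [if_pos h2, if_pos (by omega : 1 ≤ b ∧ b ≤ jc + 1)]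
      · rw [if_neg h2, if_neg (by omega : ¬(1 ≤ b ∧ b ≤ jc + 1))]
  have hsettab :
      (midT es split n (i' + 1) jc).set (i' + 1) (rowP es split n (i' + 1) (jc + 1))
        = midT es split n (i' + 1) (jc + 1) := by
    rw [midT, set_map_range _ _ _ _ (by omega)]
    apply List.map_congr_left
    intro a ha
    by_cases h : a = i' + 1
    · simp [h]
    · rw [if_neg h]
      by_cases h3 : a < i' + 1 <;> simp [h, h3]
  cases jc with
  | zero =>
    have htrue : (((0 + 1 : Nat) : Int) == 1) = true := by norm_num
    simp only [aInner, hc1, hrowprev, hrowcur, htrue, if_true]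
    rw [hread (0 + 1) (by omega), PySem.List.pySetD_natCast, PySem.List.pySetD_natCast,
      hsetrow _ (by simp [dpF, hes, List.getD_eq_getElem?_getD]), hsettab]
  | succ j' =>
    have hne : (((j' + 1 + 1 : Nat) : Int) == 1) = false := by
      simp only [beq_eq_false_iff_ne, ne_eq]
      push_cast; omega
    have hc2 : ((j' + 1 + 1 : Nat) : Int) - 1 = ((j' + 1 : Nat) : Int) := by push_cast; ring
    simp only [aInner, hc1, hc2, hrowprev, hrowcur, hes, hne, Bool.false_eq_true, if_false]
    rw [hread (j' + 1) (by omega), hread (j' + 1 + 1) (by omega),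
      PySem.List.pySetD_natCast, PySem.List.pySetD_natCast,
      hsetrow _ (by rw [dpF]), hsettab]

theorem inner_fold (es : List Int) (split : Int) (n ic : Nat)
    (h1 : 1 ≤ ic) (hi : ic ≤ n) (hlen : es.length = n) :
    ∀ jc, jc ≤ n →
      (PySem.List.pyRange 1 ((jc : Int) + 1) 1).foldl (aInner es split (ic : Int)) (midT es split n ic 0)
        = midT es split n ic jc := by
  intro jc
  induction jc with
  | zero => intro _; rw [PySem.List.pyRange_one_eq_nil (by norm_num)]; rfl
  | succ jc ih =>
    intro hj
    have : ((jc + 1 : Nat) : Int) + 1 = ((jc : Int) + 1) + 1 := by push_cast; ring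
    rw [this, PySem.List.pyRange_one_succ_right (by omega), List.foldl_append,
      ih (by omega), List.foldl_cons, List.foldl_nil]
    have : ((jc : Int) + 1) = ((jc + 1 : Nat) : Int) := by push_cast; ring
    rw [this, inner_step es split n ic jc h1 hi (by omega) hlen]

theorem tabl_eq_mid0 (es : List Int) (split : Int) (n kc : Nat) :
    tabl es split n kc = midT es split n (kc + 1) 0 := by
  apply List.map_congr_left
  intro a ha
  have hrow : rowP es split n (kc + 1) 0 = List.replicate (n + 1) 0 := by
    unfold rowP
    rw [show (fun b => if 1 ≤ b ∧ b ≤ 0 then dpF es split (kc + 1) b else 0) = (fun _ : Nat => (0 : Int)) by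
      funext b; simp; omega]
    simp [List.map_const']
  by_cases h : a ≤ kc
  · simp [h, show a < kc + 1 by omega]
  · by_cases h2 : a = kc + 1
    · simp [h2, hrow]
    · simp [h, h2, show ¬ a < kc + 1 by omega]

theorem mid_eq_tabl (es : List Int) (split : Int) (n kc : Nat) (_hk : kc + 1 ≤ n) :
    midT es split n (kc + 1) n = tabl es split n (kc + 1) := by
  apply List.map_congr_left
  intro a ha
  have hrow : rowP es split n (kc + 1) n = fullRow es split n (kc + 1) := by
    apply List.map_congr_left
    intro b hb
    simp only [List.mem_range] at hb
    by_cases h1 : 1 ≤ b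
    · simp [h1, show b ≤ n by omega]
    · have : b = 0 := by omega
      subst this; simp [dpF]
  by_cases h : a < kc + 1
  · simp [h, show a ≤ kc + 1 by omega]
  · by_cases h2 : a = kc + 1
    · simp [h2, hrow]
    · simp [h, h2, show ¬ a ≤ kc + 1 by omega]

theorem outer_fold (es : List Int) (split : Int) (n : Nat) (hlen : es.length = n) :
    ∀ kc, kc ≤ n →
      (PySem.List.pyRange 1 ((kc : Int) + 1) 1).foldl (aOuter es split (n : Int)) (tabl es split n 0)
        = tabl es split n kc := by
  intro kc
  induction kc with
  | zero => intro _; rw [PySem.List.pyRange_one_eq_nil (by norm_num)]; rfl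
  | succ kc ih =>
    intro hk
    have : ((kc + 1 : Nat) : Int) + 1 = ((kc : Int) + 1) + 1 := by push_cast; ring
    rw [this, PySem.List.pyRange_one_succ_right (by omega), List.foldl_append,
      ih (by omega), List.foldl_cons, List.foldl_nil]
    have hcast : ((kc : Int) + 1) = ((kc + 1 : Nat) : Int) := by push_cast; ring
    rw [hcast, aOuter, show ((n : Int) + 1) = ((n : Nat) : Int) + 1 from rfl,
      tabl_eq_mid0 es split n kc]
    have hfold := inner_fold es split n (kc + 1) (by omega) (by omega) hlen n (le_rfl)
    rw [hfold, mid_eq_tabl es split n kc (by omega)]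

theorem a_eq_dpF (es : List Int) (split : Int) :
    min_time_to_build_engine es split = dpF es split es.length es.length := by
  simp only [min_time_to_build_engine, PySem.List.len_eq]
  have hinit :
      (PySem.List.pyRange 0 ((es.length : Int) + 1) 1).map
          (fun _ => PySem.List.pyRepeat [(0 : Int)] ((es.length : Int) + 1))
        = tabl es split es.length 0 := by
    rw [PySem.List.pyRepeat_singleton, List.map_const', PySem.List.length_pyRange_one]
    have h1 : (((es.length : Int) + 1) - 0).toNat = es.length + 1 := by omega
    have h2 : ((es.length : Int) + 1).toNat = es.length + 1 := by omega
    rw [h1, h2]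
    have hfull0 : fullRow es split es.length 0 = List.replicate (es.length + 1) 0 := by
      rw [fullRow, show (fun b => dpF es split 0 b) = fun _ : Nat => (0 : Int) from funext fun b => rfl,
        List.map_const', List.length_range]
    have hrows : ∀ a ∈ List.range (es.length + 1),
        (if a ≤ 0 then fullRow es split es.length a else List.replicate (es.length + 1) 0)
          = List.replicate (es.length + 1) (0 : Int) := by
      intro a _
      split_ifs with h
      · have ha : a = 0 := by omega
        subst ha; exact hfull0
      · rfl
    rw [tabl, List.map_congr_left hrows, List.map_const', List.length_range]
  rw [hinit, outer_fold es split es.length rfl es.length le_rfl, tabl,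
    PySem.List.pyGetD_natCast, PySem.List.pyGetD_natCast,
    PySem.List.getD_map_range _ _ _ _ (by omega : es.length < es.length + 1),
    if_pos le_rfl, fullRow,
    PySem.List.getD_map_range _ _ _ _ (by omega : es.length < es.length + 1)]

-- ===== VERDICT (by name: the statement is the Claim_ definition above) =====
theorem min_time_to_build_engine_spec : Claim_equal_min_time_to_build_engine := by
  intro engines split _
  unfold Spec_min_time_to_build_engine
  rw [a_eq_dpF, b_eq_dpF]
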